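-- pv_equiv track=rewrite | github.com/YeQ456/Python-Examples | 进阶/例259.判断三角形.py | judgingTriangle
-- ===== SOURCE A (Python) =====
-- def judgingTriangle(arr):
-- 	n = len(arr)
-- 	if n > 44:
-- 		return "YES"
-- 	arr.sort()
-- 	for i in range(n - 2):
-- 		for j in range(i + 1, n - 1):
-- 			for k in range(j + 1, n):
-- 				if arr[i] + arr[j] > arr[k]:
-- 					return "YES"
-- 	return "NO"
-- ===== SOURCE B (Python) =====
-- def judgingTriangle(arr):
--     if len(arr) > 44:
--         return "YES"
--     a = sorted(arr)
--     if any(x + y > z for x, y, z in zip(a, a[1:], a[2:])):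
--         return "YES"
--     return "NO"
-- ===== Notes on version B (the rewrite author's own statement) =====
-- stated objective: alternative
-- what changed: Replaces A's triple nested index loop over all i<j<k with a single consecutive-window scan of the sorted list (arr[t]+arr[t+1]>arr[t+2]), correct because in a sorted list the consecutive triple ending at k is the easiest triple to satisfy; B also sorts a copy instead of mutating the argument.
import Mathlib
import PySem

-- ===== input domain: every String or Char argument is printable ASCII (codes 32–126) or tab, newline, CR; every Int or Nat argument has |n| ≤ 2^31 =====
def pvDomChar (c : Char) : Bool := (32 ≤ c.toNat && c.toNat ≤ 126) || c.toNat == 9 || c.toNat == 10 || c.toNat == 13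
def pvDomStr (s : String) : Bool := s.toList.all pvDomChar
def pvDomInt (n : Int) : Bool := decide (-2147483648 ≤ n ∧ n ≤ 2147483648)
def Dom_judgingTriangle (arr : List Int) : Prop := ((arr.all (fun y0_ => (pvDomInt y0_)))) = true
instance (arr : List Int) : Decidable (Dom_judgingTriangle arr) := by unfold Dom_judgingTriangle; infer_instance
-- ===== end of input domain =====

-- B replaces A's triple nested loop with a single consecutive-triple scan of the sorted list
-- (alternative decomposition; return-value equivalence only: A sorts its argument in place, B does not mutate it).


-- ===== PORT A =====
def judgingTriangle (arr : List Int) : String :=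
  let n : Int := arr.length
  if n > 44 then "YES"
  else
    let a := PySem.List.sorted arr (fun x => x) false
    if (PySem.List.pyRange 0 (n - 2) 1).any (fun i =>
         (PySem.List.pyRange (i + 1) (n - 1) 1).any (fun j =>
           (PySem.List.pyRange (j + 1) n 1).any (fun k =>
             PySem.List.pyGetD a i 0 + PySem.List.pyGetD a j 0 > PySem.List.pyGetD a k 0)))
    then "YES" else "NO"

-- ===== PORT B =====
-- consecutive-window scan: zip(a, a[1:], a[2:]) in Source B
def scan3 : List Int → Bool
  | x :: y :: z :: rest => if x + y > z then true else scan3 (y :: z :: rest)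
  | _ => false

def judgingTriangle_alt (arr : List Int) : String :=
  if (arr.length : Int) > 44 then "YES"
  else
    let a := PySem.List.sorted arr (fun x => x) false
    if scan3 a then "YES" else "NO"

-- ===== PRECONDITION & SPEC =====
def Spec_judgingTriangle (arr : List Int) (out : String) : Prop := out = judgingTriangle_alt arr
instance (arr : List Int) (out : String) : Decidable (Spec_judgingTriangle arr out) := by unfold Spec_judgingTriangle; infer_instance

-- ===== CLAIM (what is proved, stated in full; the proofs are below) =====
def Claim_equal_judgingTriangle : Prop := ∀ (arr : List Int), Dom_judgingTriangle arr → Spec_judgingTriangle arr (judgingTriangle arr)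

-- ===== LEMMAS AND PROOFS =====

-- B-side characterisation: scan3 finds a consecutive triple x+y>z
theorem scan3_iff (a : List Int) :
    scan3 a = true ↔ ∃ t, t + 2 < a.length ∧ a.getD t 0 + a.getD (t + 1) 0 > a.getD (t + 2) 0 := by
  induction a with
  | nil => simp [scan3]
  | cons x l ih =>
    cases l with
    | nil => simp [scan3]
    | cons y m =>
      cases m with
      | nil => simp [scan3]
      | cons z rest =>
        simp only [scan3]
        split_ifs with h
        · constructor
          · intro _
            exact ⟨0, by simp, by simpa using h⟩
          · intro _; rfl
        · rw [ih]
          constructor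
          · rintro ⟨t, ht, hgt⟩
            refine ⟨t + 1, ?_, ?_⟩
            · simp only [List.length_cons] at ht ⊢; omega
            · simpa [List.getD_cons_succ] using hgt
          · rintro ⟨t, ht, hgt⟩
            cases t with
            | zero => exact absurd (by simpa using hgt) h
            | succ s =>
              refine ⟨s, ?_, ?_⟩
              · simp only [List.length_cons] at ht ⊢; omega
              · simpa [List.getD_cons_succ] using hgt

-- in a (·≤·)-sorted list, some triple i<j<k works iff some consecutive triple works
theorem sorted_triple_iff (a : List Int) (ha : a.Pairwise (· ≤ ·)) :
    (∃ i j k : Nat, i < j ∧ j < k ∧ k < a.length ∧ a.getD i 0 + a.getD j 0 > a.getD k 0) ↔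
    (∃ t, t + 2 < a.length ∧ a.getD t 0 + a.getD (t + 1) 0 > a.getD (t + 2) 0) := by
  have hmono : ∀ p q : Nat, p ≤ q → q < a.length → a.getD p 0 ≤ a.getD q 0 := by
    intro p q hpq hq
    rcases Nat.lt_or_ge p q with hlt | hge
    · have := (List.pairwise_iff_getElem.mp ha) p q (by omega) hq hlt
      rwa [List.getD_eq_getElem a 0 (by omega), List.getD_eq_getElem a 0 hq]
    · have : p = q := by omega
      subst this; exact le_refl _
  constructor
  · rintro ⟨i, j, k, hij, hjk, hk, hgt⟩
    refine ⟨k - 2, by omega, ?_⟩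
    have h1 : a.getD i 0 ≤ a.getD (k - 2) 0 := hmono i (k - 2) (by omega) (by omega)
    have h2 : a.getD j 0 ≤ a.getD (k - 2 + 1) 0 := hmono j (k - 2 + 1) (by omega) (by omega)
    have hk2 : k - 2 + 2 = k := by omega
    rw [hk2]
    omega
  · rintro ⟨t, ht, hgt⟩
    exact ⟨t, t + 1, t + 2, by omega, by omega, by omega, hgt⟩

-- A-side characterisation: the nested range search finds some triple i<j<k
theorem tripleAny_iff (a : List Int) (n : Int) (hn : n = (a.length : Int)) :
    ((PySem.List.pyRange 0 (n - 2) 1).any (fun i =>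
       (PySem.List.pyRange (i + 1) (n - 1) 1).any (fun j =>
         (PySem.List.pyRange (j + 1) n 1).any (fun k =>
           PySem.List.pyGetD a i 0 + PySem.List.pyGetD a j 0 > PySem.List.pyGetD a k 0))) = true) ↔
    (∃ i j k : Nat, i < j ∧ j < k ∧ k < a.length ∧ a.getD i 0 + a.getD j 0 > a.getD k 0) := by
  subst hn
  simp only [List.any_eq_true, PySem.List.mem_pyRange_one, decide_eq_true_eq]
  constructor
  · rintro ⟨i, ⟨hi0, hi2⟩, j, ⟨hji, hj1⟩, k, ⟨hkj, hkn⟩, hgt⟩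
    refine ⟨i.toNat, j.toNat, k.toNat, by omega, by omega, by omega, ?_⟩
    rw [PySem.List.pyGetD_eq_getElem a (i := i) 0 (by omega) (by omega),
        PySem.List.pyGetD_eq_getElem a (i := j) 0 (by omega) (by omega),
        PySem.List.pyGetD_eq_getElem a (i := k) 0 (by omega) (by omega)] at hgt
    rwa [List.getD_eq_getElem a 0 (by omega), List.getD_eq_getElem a 0 (by omega),
         List.getD_eq_getElem a 0 (by omega)]
  · rintro ⟨i, j, k, hij, hjk, hk, hgt⟩
    refine ⟨(i : Int), ⟨by omega, by omega⟩, (j : Int), ⟨by omega, by omega⟩,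
            (k : Int), ⟨by omega, by omega⟩, ?_⟩
    rw [PySem.List.pyGetD_eq_getElem a (i := (i : Int)) 0 (by omega) (by omega),
        PySem.List.pyGetD_eq_getElem a (i := (j : Int)) 0 (by omega) (by omega),
        PySem.List.pyGetD_eq_getElem a (i := (k : Int)) 0 (by omega) (by omega)]
    rw [List.getD_eq_getElem a 0 (by omega), List.getD_eq_getElem a 0 (by omega),
        List.getD_eq_getElem a 0 (by omega)] at hgt
    simpa using hgt

-- ===== VERDICT (by name: the statement is the Claim_ definition above) =====
theorem judgingTriangle_spec : Claim_equal_judgingTriangle := by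
  intro arr _
  unfold Spec_judgingTriangle judgingTriangle judgingTriangle_alt
  by_cases h44 : ((arr.length : Int) > 44)
  · simp only [if_pos h44]
  · simp only [if_neg h44]
    have hlen : (PySem.List.sorted arr (fun x => x) false).length = arr.length :=
      PySem.List.length_sorted ..
    have hsorted : (PySem.List.sorted arr (fun x => x) false).Pairwise (· ≤ ·) := by
      simpa using PySem.List.sorted_pairwise arr (fun x => x)
    have key := (tripleAny_iff (PySem.List.sorted arr (fun x => x) false) (arr.length : Int)
        (by rw [hlen])).trans
      ((sorted_triple_iff _ hsorted).trans (scan3_iff _).symm)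
    by_cases hb : scan3 (PySem.List.sorted arr (fun x => x) false) = true
    · rw [if_pos (key.mpr hb), if_pos hb]
    · rw [if_neg (fun h => hb (key.mp h)), if_neg hb]
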